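-- pv_equiv track=rewrite | github.com/GeomMotif/GeomMotif | construction/find_substructures.py | check_sequence_gaps
-- ===== SOURCE A (Python) =====
-- def check_sequence_gaps(residue_indices):
--     """Check sequence gaps and return fragment information."""
--     sorted_indices = sorted(residue_indices)
--     fragments = []
--     current_fragment = [sorted_indices[0]]
--
--     for i in range(1, len(sorted_indices)):
--         if sorted_indices[i] == sorted_indices[i-1] + 1:
--             current_fragment.append(sorted_indices[i])
--         else:
--             fragments.append(current_fragment)
--             current_fragment = [sorted_indices[i]]
--     fragments.append(current_fragment)
--
--     # Count single-residue fragments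
--     single_residue_fragments = sum(1 for frag in fragments if len(frag) == 1)
--
--     return fragments, single_residue_fragments
-- ===== SOURCE B (Python) =====
-- def check_sequence_gaps(residue_indices):
--     """Check sequence gaps and return fragment information."""
--     s = sorted(residue_indices)
--     # Pass 1: run-length profile of maximal consecutive runs.
--     lengths = []
--     run = 1
--     for prev, v in zip(s, s[1:]):
--         if v == prev + 1:
--             run += 1
--         else:
--             lengths.append(run)
--             run = 1
--     lengths.append(run)
--     # Pass 2: materialize fragments by slicing at cumulative lengths.
--     fragments = []
--     pos = 0
--     for L in lengths:
--         fragments.append(s[pos:pos + L])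
--         pos += L
--     single_residue_fragments = sum(L == 1 for L in lengths)
--     return fragments, single_residue_fragments
-- ===== Notes on version B (the rewrite author's own statement) =====
-- stated objective: alternative
-- what changed: B replaces A's single accumulate-and-flush pass with a two-phase decomposition: first compute the run-length profile of maximal consecutive runs from zip(s, s[1:]), then materialize fragments by slicing the sorted list at cumulative lengths, counting singletons directly from the length profile.
import Mathlib
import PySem

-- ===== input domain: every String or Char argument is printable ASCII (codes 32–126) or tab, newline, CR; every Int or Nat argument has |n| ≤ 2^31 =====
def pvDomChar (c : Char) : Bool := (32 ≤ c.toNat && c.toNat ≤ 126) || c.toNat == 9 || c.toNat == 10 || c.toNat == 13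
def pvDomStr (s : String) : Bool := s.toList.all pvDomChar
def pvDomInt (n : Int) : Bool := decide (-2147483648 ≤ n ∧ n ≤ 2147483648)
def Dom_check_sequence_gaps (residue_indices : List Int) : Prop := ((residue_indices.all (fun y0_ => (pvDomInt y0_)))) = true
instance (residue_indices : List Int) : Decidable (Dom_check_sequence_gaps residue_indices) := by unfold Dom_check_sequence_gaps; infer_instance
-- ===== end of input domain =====

-- B replaces A's element-by-element fragment accumulation with a two-pass decomposition
-- (run-length profile over adjacent pairs, then slicing at cumulative lengths); objective: alternative.

-- ===== PORT A =====
-- the for-loop over range(1, len) comparing s[i] with s[i-1], carried as structural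
-- recursion over the tail with the previous element as state (same comparisons, same state)
def aLoop (rest : List Int) (frags : List (List Int)) (cur : List Int) (prev : Int) :
    List (List Int) × List Int :=
  match rest with
  | [] => (frags, cur)
  | x :: xs =>
    if x = prev + 1 then aLoop xs frags (cur ++ [x]) x
    else aLoop xs (frags ++ [cur]) [x] x

def check_sequence_gaps (residue_indices : List Int) : List (List Int) × Int :=
  let sorted_indices := PySem.List.sorted residue_indices (fun x => x) false
  match sorted_indices with
  | [] => ([], 0)  -- sorted_indices[0] raises IndexError in Python; excluded by Pre_
  | h :: t =>
    let p := aLoop t [] [h] h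
    let fragments := p.1 ++ [p.2]
    (fragments,
     fragments.foldl (fun acc frag => if frag.length = 1 then acc + 1 else acc) 0)

-- ===== PORT B =====
-- pass 1: run lengths from zip(s, s[1:])
def bLens (pairs : List (Int × Int)) (run : Int) (lens : List Int) : List Int :=
  match pairs with
  | [] => lens ++ [run]
  | (prev, v) :: rest =>
    if v = prev + 1 then bLens rest (run + 1) lens
    else bLens rest 1 (lens ++ [run])

-- pass 2: slices at cumulative positions
def bBuild (s : List Int) (lens : List Int) (pos : Int) (frags : List (List Int)) :
    List (List Int) :=
  match lens with
  | [] => frags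
  | L :: ls => bBuild s ls (pos + L) (frags ++ [PySem.List.slice s (some pos) (some (pos + L))])

def check_sequence_gaps_alt (residue_indices : List Int) : List (List Int) × Int :=
  let s := PySem.List.sorted residue_indices (fun x => x) false
  let lengths := bLens (s.zip (PySem.List.slice s (some 1) none)) 1 []
  let fragments := bBuild s lengths 0 []
  (fragments, lengths.foldl (fun acc L => acc + (if L = 1 then 1 else 0)) 0)

-- ===== PRECONDITION & SPEC =====
-- A raises IndexError (sorted_indices[0]) on the empty list; Pre_ excludes exactly that input.
def Pre_check_sequence_gaps (residue_indices : List Int) : Prop := residue_indices ≠ []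
instance (residue_indices : List Int) : Decidable (Pre_check_sequence_gaps residue_indices) := by unfold Pre_check_sequence_gaps; infer_instance
def pvWitness_check_sequence_gaps : List Int := ([3, 1, 2, 7])
def Spec_check_sequence_gaps (residue_indices : List Int) (out : List (List Int) × Int) : Prop := out = check_sequence_gaps_alt residue_indices
instance (residue_indices : List Int) (out : List (List Int) × Int) : Decidable (Spec_check_sequence_gaps residue_indices out) := by unfold Spec_check_sequence_gaps; infer_instance

-- ===== CLAIM (what is proved, stated in full; the proofs are below) =====
def Claim_equal_check_sequence_gaps : Prop := ∀ (residue_indices : List Int), Dom_check_sequence_gaps residue_indices → Pre_check_sequence_gaps residue_indices → Spec_check_sequence_gaps residue_indices (check_sequence_gaps residue_indices)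

-- ===== LEMMAS AND PROOFS =====

-- the maximal consecutive run continuing prev, and the remainder
def pvRun (prev : Int) : List Int → List Int × List Int
  | [] => ([], [])
  | x :: xs => if x = prev + 1 then
      let p := pvRun x xs
      (x :: p.1, p.2)
    else ([], x :: xs)

theorem pvRun_cons_pos (prev x : Int) (xs : List Int) (h : x = prev + 1) :
    pvRun prev (x :: xs) = (x :: (pvRun x xs).1, (pvRun x xs).2) := by
  simp [pvRun, h]

theorem pvRun_cons_neg (prev x : Int) (xs : List Int) (h : ¬ x = prev + 1) :
    pvRun prev (x :: xs) = ([], x :: xs) := by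
  simp [pvRun, h]

theorem pvRun_snd_length (prev : Int) (l : List Int) : (pvRun prev l).2.length ≤ l.length := by
  induction l generalizing prev with
  | nil => simp [pvRun]
  | cons x xs ih =>
    by_cases h : x = prev + 1
    · rw [pvRun_cons_pos prev x xs h]
      exact le_trans (ih x) (Nat.le_succ _)
    · rw [pvRun_cons_neg prev x xs h]

-- the chunk decomposition of prev :: t into maximal consecutive runs
def pvChunks (prev : Int) (l : List Int) : List (List Int) :=
  let p := pvRun prev l
  match h : p.2 with
  | [] => [prev :: p.1]
  | y :: ys => (prev :: p.1) :: pvChunks y ys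
termination_by l.length
decreasing_by
  have hlen := pvRun_snd_length prev l
  rw [h] at hlen
  simp at hlen
  omega

def pvRest (prev : Int) (l : List Int) : List (List Int) :=
  match (pvRun prev l).2 with
  | [] => []
  | y :: ys => pvChunks y ys

theorem pvChunks_eq (prev : Int) (l : List Int) :
    pvChunks prev l = (prev :: (pvRun prev l).1) :: pvRest prev l := by
  rw [pvChunks, pvRest]
  rcases h : (pvRun prev l).2 with _ | ⟨y, ys⟩ <;> simp

theorem pvRest_cons_pos (prev x : Int) (xs : List Int) (h : x = prev + 1) :
    pvRest prev (x :: xs) = pvRest x xs := by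
  rw [pvRest, pvRest, pvRun_cons_pos prev x xs h]

theorem pvRest_cons_neg (prev x : Int) (xs : List Int) (h : ¬ x = prev + 1) :
    pvRest prev (x :: xs) = pvChunks x xs := by
  rw [pvRest, pvRun_cons_neg prev x xs h]

theorem pvRun_flatten (prev : Int) (l : List Int) :
    (pvRun prev l).1 ++ (pvRun prev l).2 = l := by
  induction l generalizing prev with
  | nil => simp [pvRun]
  | cons x xs ih =>
    by_cases h : x = prev + 1
    · rw [pvRun_cons_pos prev x xs h]
      simpa using ih x
    · rw [pvRun_cons_neg prev x xs h]
      simp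

theorem pvChunks_flatten (prev : Int) (l : List Int) :
    (pvChunks prev l).flatten = prev :: l := by
  induction prev, l using pvChunks.induct with
  | case1 prev l p hp =>
    rw [pvChunks_eq, pvRest, hp]
    have := pvRun_flatten prev l
    rw [hp] at this
    simp only [List.append_nil] at this
    simp [this]
  | case2 prev l p y ys hp ih =>
    rw [pvChunks_eq, pvRest, hp, List.flatten_cons, ih]
    have := pvRun_flatten prev l
    rw [hp] at this
    rw [List.cons_append, this]

-- A's loop produces the chunk decomposition
theorem aLoop_eq (t : List Int) (prev : Int) (frags : List (List Int)) (cur : List Int) :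
    (aLoop t frags cur prev).1 ++ [(aLoop t frags cur prev).2]
      = frags ++ (cur ++ (pvRun prev t).1) :: pvRest prev t := by
  induction t generalizing prev frags cur with
  | nil => simp [aLoop, pvRun, pvRest]
  | cons x xs ih =>
    by_cases h : x = prev + 1
    · rw [aLoop, if_pos h, ih, pvRun_cons_pos prev x xs h, pvRest_cons_pos prev x xs h]
      simp
    · rw [aLoop, if_neg h, ih, pvRun_cons_neg prev x xs h, pvRest_cons_neg prev x xs h,
        pvChunks_eq]
      simp

-- B's first pass produces the chunk lengths
theorem bLens_eq (t : List Int) (prev r : Int) (lens : List Int) :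
    bLens ((prev :: t).zip t) r lens
      = lens ++ (r + ((pvRun prev t).1.length : Int)) :: (pvRest prev t).map (fun c => (c.length : Int)) := by
  induction t generalizing prev r lens with
  | nil => simp [bLens, pvRun, pvRest]
  | cons x xs ih =>
    have hz : (prev :: x :: xs).zip (x :: xs) = (prev, x) :: (x :: xs).zip xs := by
      simp [List.zip]
    rw [hz]
    by_cases h : x = prev + 1
    · rw [bLens, if_pos h, ih, pvRun_cons_pos prev x xs h, pvRest_cons_pos prev x xs h]
      simp
      omega
    · rw [bLens, if_neg h, ih, pvRun_cons_neg prev x xs h, pvRest_cons_neg prev x xs h,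
        pvChunks_eq]
      simp
      omega

-- B's second pass rebuilds the chunks from their lengths
theorem bBuild_eq (cs : List (List Int)) (p : List Int) (frags : List (List Int)) :
    bBuild (p ++ cs.flatten) (cs.map (fun c => (c.length : Int))) ((p.length : Int)) frags
      = frags ++ cs := by
  induction cs generalizing p frags with
  | nil => simp [bBuild]
  | cons c cs' ih =>
    rw [List.map_cons, bBuild]
    have hslice : PySem.List.slice (p ++ (c :: cs').flatten) (some (p.length : Int))
        (some ((p.length : Int) + (c.length : Int))) = c := by
      rw [PySem.List.slice_natCast_add]
      simp
    rw [hslice]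
    have hpos : ((p.length : Int) + (c.length : Int)) = (((p ++ c).length : Nat) : Int) := by
      simp [List.length_append]
    have hflat : p ++ (c :: cs').flatten = (p ++ c) ++ cs'.flatten := by
      simp
    rw [hpos, hflat, ih (p ++ c) (frags ++ [c])]
    simp

-- the two single-fragment counts agree
theorem count_eq (cs : List (List Int)) (i : Int) :
    (cs.map (fun c => (c.length : Int))).foldl (fun acc L => acc + (if L = 1 then 1 else 0)) i
      = cs.foldl (fun acc frag => if frag.length = 1 then acc + 1 else acc) i := by
  induction cs generalizing i with
  | nil => simp
  | cons c cs' ih =>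
    have hiff : ((c.length : Int) = 1) ↔ (c.length = 1) := by omega
    by_cases h : c.length = 1
    · simp only [List.map_cons, List.foldl_cons, if_pos (hiff.mpr h), if_pos h]
      exact ih (i + 1)
    · simp only [List.map_cons, List.foldl_cons, if_neg (fun hh => h (hiff.mp hh)), if_neg h]
      simpa using ih i

-- ===== VERDICT (by name: the statement is the Claim_ definition above) =====
theorem check_sequence_gaps_spec : Claim_equal_check_sequence_gaps := by
  intro l _ hpre
  unfold Spec_check_sequence_gaps check_sequence_gaps check_sequence_gaps_alt
  have hs : PySem.List.sorted l (fun x => x) false ≠ [] := by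
    rw [Ne, PySem.List.sorted_eq_nil_iff]
    exact hpre
  rcases hst : PySem.List.sorted l (fun x => x) false with _ | ⟨h, t⟩
  · exact absurd hst hs
  simp only
  -- A's fragments
  have hA : (aLoop t [] [h] h).1 ++ [(aLoop t [] [h] h).2] = pvChunks h t := by
    rw [aLoop_eq, pvChunks_eq]
    simp
  -- B's lengths
  have htail : PySem.List.slice (h :: t) (some 1) none = t := by
    rw [PySem.List.slice_from_one]
    simp
  have hB : bLens ((h :: t).zip (PySem.List.slice (h :: t) (some 1) none)) 1 []
      = (pvChunks h t).map (fun c => (c.length : Int)) := by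
    rw [htail, bLens_eq, pvChunks_eq]
    simp
    ring
  have hflat : h :: t = ([] : List Int) ++ (pvChunks h t).flatten := by
    rw [pvChunks_flatten]
    simp
  have hbuild : bBuild (h :: t) ((pvChunks h t).map (fun c => (c.length : Int))) 0 []
      = pvChunks h t := by
    have := bBuild_eq (pvChunks h t) [] []
    simpa [← hflat] using this
  rw [hA, hB, hbuild, count_eq]
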